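-- pv_equiv track=rewrite | github.com/te5in/CodeGra.de | psef/ignore.py | read_ignore_patterns
-- ===== SOURCE A (Python) =====
-- import typing as t
--
-- def read_ignore_patterns(f: t.Iterable[str]
--                          ) -> t.Iterable[t.Tuple[str, str]]:
--     """Read a git ignore file.
--
--     :param f: Iterable to read from
--     :return: List of patterns
--     """
--
--     for line in f:
--         line = line.rstrip('\r\n')
--         original_line = line
--
--         # Ignore blank lines, they're used for readability.
--         if not line:
--             continue
--
--         if line.startswith('#'):
--             # Comment
--             continue
--
--         # Trailing spaces are ignored unless they are quoted with a backslash.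
--         while line.endswith(' ') and not line.endswith('\\ '):
--             line = line[:-1]
--         line = line.replace('\\ ', ' ')
--
--         yield line, original_line
-- ===== SOURCE B (Python) =====
-- import typing as t
--
-- def read_ignore_patterns(f: t.Iterable[str]
--                          ) -> t.Iterable[t.Tuple[str, str]]:
--     """Read a git ignore file.
--
--     :param f: Iterable to read from
--     :return: List of patterns
--     """
--     for line in f:
--         line = line.rstrip('\r\n')
--         if not line or line.startswith('#'):
--             continue
--         # Closed-form trim instead of the char-by-char while loop:
--         # strip the whole run of trailing spaces at once, then put one
--         # space back when the run was opened by an escaping backslash.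
--         r = line.rstrip(' ')
--         if r and r[-1] == '\\' and len(r) < len(line):
--             r = line[:len(r) + 1]
--         yield r.replace('\\ ', ' '), line
-- ===== Notes on version B (the rewrite author's own statement) =====
-- stated objective: simpler
-- what changed: The char-by-char while loop that pops trailing spaces one at a time is replaced by a closed form: rstrip(' ') removes the whole run at once and one space is put back when the run was opened by an escaping backslash.
import Mathlib
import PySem

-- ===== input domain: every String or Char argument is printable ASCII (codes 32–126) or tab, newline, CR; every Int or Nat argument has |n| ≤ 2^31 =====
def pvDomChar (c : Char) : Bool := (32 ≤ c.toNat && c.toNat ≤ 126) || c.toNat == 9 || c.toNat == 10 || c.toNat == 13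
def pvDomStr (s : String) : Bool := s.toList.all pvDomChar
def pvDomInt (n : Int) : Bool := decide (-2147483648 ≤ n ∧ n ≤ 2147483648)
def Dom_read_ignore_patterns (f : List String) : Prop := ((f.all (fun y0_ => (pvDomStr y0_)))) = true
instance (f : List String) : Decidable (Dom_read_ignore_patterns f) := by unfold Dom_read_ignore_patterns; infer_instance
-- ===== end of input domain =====

-- B replaces A's char-by-char while loop over trailing spaces by a closed form
-- (one rstrip(' '), putting one space back when the run was opened by '\'); same cost, simpler.

-- ===== PORT A =====
-- hand port of s.rstrip('\r\n'): removes the maximal trailing run of '\r'/'\n' characters (exact)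
def pvRstripCRLF (cs : List Char) : List Char :=
  (cs.reverse.dropWhile (fun c => c == '\r' || c == '\n')).reverse

-- the while loop: while line.endswith(' ') and not line.endswith('\\ '): line = line[:-1]
def pvTrimA (cs : List Char) : List Char :=
  if h : (PySem.Chars.endswith cs [' '] && !PySem.Chars.endswith cs ['\\', ' ']) = true
  then pvTrimA (PySem.Chars.slice cs none (some (-1)))   -- line = line[:-1]
  else cs
termination_by cs.length
decreasing_by
  simp only [PySem.Chars.slice_eq_listSlice, PySem.List.slice_to_neg_one]
  simp only [Bool.and_eq_true] at h
  have hne : cs ≠ [] := by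
    rcases (PySem.Chars.endswith_iff cs [' ']).mp h.1 with ⟨t, ht⟩
    intro hnil; simp [hnil] at ht
  have := List.length_pos_iff.mpr hne
  simp [List.length_dropLast]; omega

def read_ignore_patterns (f : List String) : List (String × String) :=
  f.foldl (fun acc s =>
    let line := pvRstripCRLF s.toList          -- line = line.rstrip('\r\n')
    let original_line := line
    if line = [] then acc                      -- if not line: continue
    else if PySem.Chars.startswith line ['#'] then acc   -- comment
    else
      let line2 := pvTrimA line
      let line3 := PySem.Chars.replace line2 ['\\', ' '] [' ']
      acc ++ [(String.ofList line3, String.ofList original_line)]) []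

-- ===== PORT B =====
-- hand port of s.rstrip(' '): removes the maximal trailing run of spaces (exact)
def pvRstripSp (cs : List Char) : List Char :=
  (cs.reverse.dropWhile (fun c => c == ' ')).reverse

-- r = line.rstrip(' '); if r and r[-1] == '\\' and len(r) < len(line): r = line[:len(r)+1]
def pvTrimB (cs : List Char) : List Char :=
  let r := pvRstripSp cs
  if r ≠ [] ∧ PySem.List.pyGet? r (-1) = some '\\' ∧ r.length < cs.length
  then PySem.Chars.slice cs none (some ((r.length : Int) + 1))   -- line[:len(r)+1]
  else r

def read_ignore_patterns_alt (f : List String) : List (String × String) :=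
  f.foldl (fun acc s =>
    let line := pvRstripCRLF s.toList
    if line = [] || PySem.Chars.startswith line ['#'] then acc
    else
      let r := pvTrimB line
      acc ++ [(String.ofList (PySem.Chars.replace r ['\\', ' '] [' ']), String.ofList line)]) []

-- ===== PRECONDITION & SPEC =====
def Spec_read_ignore_patterns (f : List String) (out : List (String × String)) : Prop := out = read_ignore_patterns_alt f
instance (f : List String) (out : List (String × String)) : Decidable (Spec_read_ignore_patterns f out) := by unfold Spec_read_ignore_patterns; infer_instance

-- ===== CLAIM (what is proved, stated in full; the proofs are below) =====
def Claim_equal_read_ignore_patterns : Prop := ∀ (f : List String), Dom_read_ignore_patterns f → Spec_read_ignore_patterns f (read_ignore_patterns f)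

-- ===== LEMMAS AND PROOFS =====

-- rstrip(' ') eats a trailing space
lemma pvRstripSp_concat_space (u : List Char) : pvRstripSp (u ++ [' ']) = pvRstripSp u := by
  simp [pvRstripSp]

-- rstrip(' ') is the identity when the last character is not a space
lemma pvRstripSp_of_getLast (cs : List Char) (h : cs.getLast? ≠ some ' ') : pvRstripSp cs = cs := by
  unfold pvRstripSp
  have hh : cs.reverse.head? = cs.getLast? := List.head?_reverse
  cases hr : cs.reverse with
  | nil => simpa using congrArg List.reverse hr
  | cons x t =>
    have hx : x ≠ ' ' := by
      intro hx; apply h; rw [← hh, hr, hx]; rfl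
    rw [List.dropWhile_cons]
    simp [hx]
    calc t.reverse ++ [x] = (x :: t).reverse := by simp
    _ = cs := by rw [← hr]; simp

lemma pvRstripSp_length_le (cs : List Char) : (pvRstripSp cs).length ≤ cs.length := by
  unfold pvRstripSp
  have := (List.dropWhile_suffix (l := cs.reverse) (fun c => c == ' ')).length_le
  simpa using this

-- the key per-line fact: the while loop equals the closed form
lemma pvTrim_eq (cs : List Char) : pvTrimA cs = pvTrimB cs := by
  induction hn : cs.length using Nat.strong_induction_on generalizing cs with
  | _ n ih =>
  subst hn
  rw [pvTrimA]
  split_ifs with hg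
  · -- loop step: cs ends with ' ' but not with '\ '
    simp only [Bool.and_eq_true, Bool.not_eq_true'] at hg
    obtain ⟨hsp, hbs⟩ := hg
    rcases (PySem.Chars.endswith_iff cs [' ']).mp hsp with ⟨u, hu⟩
    subst hu
    have hlast : u = [] ∨ u.getLast? ≠ some '\\' := by
      rcases List.eq_nil_or_concat u with h0 | ⟨v, x, rfl⟩
      · exact Or.inl h0
      · refine Or.inr ?_
        intro hx
        have hx' : x = '\\' := by simpa using hx
        subst hx'
        have : PySem.Chars.endswith (v.concat '\\' ++ [' ']) ['\\', ' '] = true :=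
          (PySem.Chars.endswith_iff _ _).mpr ⟨v, by simp⟩
        rw [this] at hbs; simp at hbs
    have hdrop : PySem.Chars.slice (u ++ [' ']) none (some (-1)) = u := by
      rw [PySem.Chars.slice_eq_listSlice, PySem.List.slice_to_neg_one, List.dropLast_concat]
    rw [hdrop]
    have hlen : u.length < (u ++ [' ']).length := by simp
    rw [ih u.length hlen u rfl]
    -- pvTrimB (u ++ [' ']) = pvTrimB u
    unfold pvTrimB
    simp only [pvRstripSp_concat_space]
    set r := pvRstripSp u with hr
    have hrlen : r.length ≤ u.length := pvRstripSp_length_le u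
    by_cases hc : r ≠ [] ∧ PySem.List.pyGet? r (-1) = some '\\' ∧ r.length < u.length
    · have hc' : r ≠ [] ∧ PySem.List.pyGet? r (-1) = some '\\' ∧ r.length < (u ++ [' ']).length := by
        refine ⟨hc.1, hc.2.1, ?_⟩; simp; omega
      rw [if_pos hc', if_pos hc]
      rw [PySem.Chars.slice_eq_listSlice, PySem.Chars.slice_eq_listSlice,
          PySem.List.slice_to u (b := (r.length : Int) + 1) (by omega),
          PySem.List.slice_to (u ++ [' ']) (b := (r.length : Int) + 1) (by omega)]
      have hk : ((r.length : Int) + 1).toNat = r.length + 1 := by omega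
      rw [hk, List.take_append_of_le_length (by omega)]
    · have hc' : ¬ (r ≠ [] ∧ PySem.List.pyGet? r (-1) = some '\\' ∧ r.length < (u ++ [' ']).length) := by
        intro ⟨h1, h2, h3⟩
        apply hc
        refine ⟨h1, h2, ?_⟩
        rcases lt_or_eq_of_le hrlen with hlt | heq
        · exact hlt
        · exfalso
          -- r.length = u.length forces r = u, so u ends with '\\', contradicting hlast
          have hrequ : r = u := by
            have hsuf : r.reverse <:+ u.reverse := by
              rw [hr]; unfold pvRstripSp; simpa using List.dropWhile_suffix _
            have : r.reverse = u.reverse := List.IsSuffix.eq_of_length hsuf (by simp [heq])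
            simpa using congrArg List.reverse this
          rcases hlast with h0 | hne
          · exact h1 (hrequ.trans h0)
          · apply hne
            rw [← hrequ, ← PySem.List.pyGet?_neg_one, h2]
      rw [if_neg hc', if_neg hc]
  · -- loop does not fire: already trimmed
    simp only [Bool.and_eq_true, Bool.not_eq_true', not_and] at hg
    by_cases hsp : PySem.Chars.endswith cs [' '] = true
    · -- cs ends with '\ ': rstrip removes exactly one space, condition holds, slice restores cs
      have hbs : PySem.Chars.endswith cs ['\\', ' '] = true := by
        by_contra hb
        exact absurd (hg hsp) (by simpa using hb)
      rcases (PySem.Chars.endswith_iff cs ['\\', ' ']).mp hbs with ⟨t, ht⟩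
      have hcs : cs = (t ++ ['\\']) ++ [' '] := by rw [← ht]; simp
      unfold pvTrimB
      rw [hcs, pvRstripSp_concat_space,
          pvRstripSp_of_getLast (t ++ ['\\']) (by simp)]
      have hcond : (t ++ ['\\']) ≠ [] ∧ PySem.List.pyGet? (t ++ ['\\']) (-1) = some '\\' ∧
          (t ++ ['\\']).length < ((t ++ ['\\']) ++ [' ']).length := by
        refine ⟨by simp, ?_, by simp⟩
        rw [PySem.List.pyGet?_neg_one]; simp
      rw [if_pos hcond]
      rw [PySem.Chars.slice_eq_listSlice,
          PySem.List.slice_to ((t ++ ['\\']) ++ [' ']) (b := ((t ++ ['\\']).length : Int) + 1) (by omega)]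
      have hk : (((t ++ ['\\']).length : Int) + 1).toNat = (t ++ ['\\']).length + 1 := by omega
      rw [hk]
      exact (List.take_of_length_le (by simp)).symm
    · -- cs does not end with a space: rstrip(' ') is the identity
      unfold pvTrimB
      have hlast : cs.getLast? ≠ some ' ' := by
        intro hl
        apply hsp
        rw [PySem.Chars.endswith_iff]
        rcases List.eq_nil_or_concat cs with h0 | ⟨v, x, rfl⟩
        · simp [h0] at hl
        · have hx : x = ' ' := by simpa using hl
          subst hx; exact ⟨v, by simp⟩
      rw [pvRstripSp_of_getLast cs hlast]
      rw [if_neg (by intro ⟨_, _, h3⟩; omega)]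

-- ===== VERDICT (by name: the statement is the Claim_ definition above) =====
theorem read_ignore_patterns_spec : Claim_equal_read_ignore_patterns := by
  intro f _
  unfold Spec_read_ignore_patterns read_ignore_patterns read_ignore_patterns_alt
  congr 1
  funext acc s
  simp only [pvTrim_eq]
  split_ifs with h1 h2 h3 <;> simp_all
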